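-- pv_equiv track=rewrite | github.com/dbetm/cp-history | CodeForces/C/4_BalancedTeam.py | getMaxNumMembers
-- ===== SOURCE A (Python) =====
-- def getMaxNumMembers(n, team):
--     team = sorted(team)
--     a = 0
--     b = 0
--     ans = 1
--     cont = 1
--
--     while b < n:
--         if (b+1) < n and abs(team[b+1] - team[a]) <= 5:
--             cont += 1
--             b += 1
--
--             if ans < cont:
--                 ans = cont
--         else:
--             cont = max(1, cont - 1)
--             a += 1
--
--             if a > b:
--                 b = a
--
--     return ans
-- ===== SOURCE B (Python) =====
-- def getMaxNumMembers(n, team):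
--     s = sorted(team)
--     ans = 1
--     for i in range(n - 1):
--         target = s[i] + 5
--         lo, hi = i, n
--         while lo < hi:
--             mid = (lo + hi) // 2
--             if s[mid] <= target:
--                 lo = mid + 1
--             else:
--                 hi = mid
--         ans = max(ans, lo - i)
--     return ans
-- ===== Notes on version B (the rewrite author's own statement) =====
-- stated objective: alternative
-- what changed: A's stateful two-pointer sweep (with its cont counter and pointer fix-ups) is replaced by a per-element binary search: for each start index i, bisect-right finds the first element exceeding team[i]+5 in the sorted list.
import Mathlib
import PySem

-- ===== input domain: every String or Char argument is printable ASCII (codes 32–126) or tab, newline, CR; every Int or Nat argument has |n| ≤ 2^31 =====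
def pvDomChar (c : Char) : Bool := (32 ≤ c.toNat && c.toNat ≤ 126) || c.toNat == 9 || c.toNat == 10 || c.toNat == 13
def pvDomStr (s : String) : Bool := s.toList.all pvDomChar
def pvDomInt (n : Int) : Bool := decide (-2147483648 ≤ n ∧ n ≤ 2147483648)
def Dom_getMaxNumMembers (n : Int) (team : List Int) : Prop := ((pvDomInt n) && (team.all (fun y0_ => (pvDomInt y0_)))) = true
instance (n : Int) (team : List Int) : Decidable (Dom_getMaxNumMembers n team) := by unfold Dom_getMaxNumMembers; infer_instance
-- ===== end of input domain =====

-- B replaces A's two-pointer sweep with a per-element binary search over the sorted list (alternative algorithm, same O(n log n) cost).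

-- ===== PORT A =====
-- the while loop of A; state (a, b, ans, cont); none = IndexError
def loopA (n : Int) (team : List Int) (a b ans cont : Int) : Option Int :=
  if b < n then
    if b + 1 < n then
      match PySem.List.pyGet? team (b + 1), PySem.List.pyGet? team a with
      | some x, some y =>
        if |x - y| ≤ 5 then
          loopA n team a (b + 1) (if ans < cont + 1 then cont + 1 else ans) (cont + 1)
        else
          loopA n team (a + 1) (if a + 1 > b then a + 1 else b) ans (max 1 (cont - 1))
      | _, _ => none
    else
      loopA n team (a + 1) (if a + 1 > b then a + 1 else b) ans (max 1 (cont - 1))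
  else some ans
termination_by ((n - a).toNat + (n - b).toNat)
decreasing_by all_goals first | omega | (split_ifs <;> omega)

def getMaxNumMembers (n : Int) (team : List Int) : Int :=
  let t := PySem.List.sorted team (fun x => x) false
  (loopA n t 0 0 1 1).getD 0

-- ===== PORT B =====
-- the inner while loop of B: bisect-right of `target` in s[lo:hi]; none = IndexError
-- mid = (lo + hi) // 2
def bmid (lo hi : Int) : Int := PySem.Int.floordiv (lo + hi) 2

theorem bmid_bounds (lo hi : Int) (h : lo < hi) : lo ≤ bmid lo hi ∧ bmid lo hi < hi := by
  rcases PySem.Int.floordiv_two_mid_bounds (le_of_lt h) with ⟨h1, _⟩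
  exact ⟨h1, (PySem.Int.floordiv_lt_iff_lt_mul (by omega)).mpr (by omega)⟩

def bsearchB (s : List Int) (target lo hi : Int) : Option Int :=
  if lo < hi then
    match PySem.List.pyGet? s (bmid lo hi) with
    | some v => if v ≤ target then bsearchB s target (bmid lo hi + 1) hi
                else bsearchB s target lo (bmid lo hi)
    | none => none
  else some lo
termination_by (hi - lo).toNat
decreasing_by
  all_goals (rcases bmid_bounds lo hi (by omega) with ⟨h1, h2⟩; omega)

-- the for loop of B over range(n-1)
def loopB (s : List Int) (n : Int) (ans : Int) (is_ : List Int) : Option Int :=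
  match is_ with
  | [] => some ans
  | i :: rest =>
    match PySem.List.pyGet? s i with
    | some si =>
      match bsearchB s (si + 5) i n with
      | some lo => loopB s n (max ans (lo - i)) rest
      | none => none
    | none => none

def getMaxNumMembers_alt (n : Int) (team : List Int) : Int :=
  let s := PySem.List.sorted team (fun x => x) false
  (loopB s n 1 (PySem.List.pyRange 0 (n - 1) 1)).getD 0

-- ===== PRECONDITION & SPEC =====
-- Pre_ excludes exactly the inputs on which A raises IndexError (n ≥ 2 with fewer than n team members).
def Pre_getMaxNumMembers (n : Int) (team : List Int) : Prop :=
  n ≤ 1 ∨ n ≤ (team.length : Int)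
instance (n : Int) (team : List Int) : Decidable (Pre_getMaxNumMembers n team) := by
  unfold Pre_getMaxNumMembers; infer_instance

def pvWitness_getMaxNumMembers : Int × List Int := (3, [1, 10, 4])

def Spec_getMaxNumMembers (n : Int) (team : List Int) (out : Int) : Prop := out = getMaxNumMembers_alt n team
instance (n : Int) (team : List Int) (out : Int) : Decidable (Spec_getMaxNumMembers n team out) := by unfold Spec_getMaxNumMembers; infer_instance

-- ===== CLAIM (what is proved, stated in full; the proofs are below) =====
def Claim_equal_getMaxNumMembers : Prop := ∀ (n : Int) (team : List Int), Dom_getMaxNumMembers n team → Pre_getMaxNumMembers n team → Spec_getMaxNumMembers n team (getMaxNumMembers n team)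

-- ===== LEMMAS AND PROOFS =====

-- s[i] as a total function (indices are nonnegative in all uses)
def elI (s : List Int) (i : Int) : Int := s.getD i.toNat 0

-- linear-scan characterisation of bisect_right(s, t, j, n): first index ≥ j whose element exceeds t, else n
def fIdx (s : List Int) (t : Int) (j n : Int) : Int :=
  if j < n then (if elI s j ≤ t then fIdx s t (j + 1) n else j) else n
termination_by (n - j).toNat
decreasing_by omega

-- max over a ≤ i < n of (fIdx at i) - i, computed back to front; 1 when empty
def Gfun (s : List Int) (n a : Int) : Int :=
  if a < n then max (fIdx s (elI s a + 5) a n - a) (Gfun s n (a + 1)) else 1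
termination_by (n - a).toNat
decreasing_by omega

theorem fIdx_ge_self (s : List Int) (t j n : Int) (h : j ≤ n) : j ≤ fIdx s t j n := by
  rw [fIdx]
  split_ifs with h1 h2
  · have := fIdx_ge_self s t (j + 1) n (by omega)
    omega
  · omega
  · omega
termination_by (n - j).toNat
decreasing_by omega

theorem fIdx_le_n (s : List Int) (t j n : Int) (h : j ≤ n) : fIdx s t j n ≤ n := by
  rw [fIdx]
  split_ifs with h1 h2
  · exact fIdx_le_n s t (j + 1) n (by omega)
  · omega
  · omega
termination_by (n - j).toNat
decreasing_by omega

theorem fIdx_mem_le (s : List Int) (t j n : Int) :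
    ∀ k, j ≤ k → k < fIdx s t j n → elI s k ≤ t := by
  intro k hk1 hk2
  rw [fIdx] at hk2
  split_ifs at hk2 with h1 h2
  · rcases eq_or_lt_of_le hk1 with rfl | h
    · exact h2
    · exact fIdx_mem_le s t (j + 1) n k (by omega) hk2
  · omega
  · omega
termination_by (n - j).toNat
decreasing_by omega

theorem fIdx_lt_imp (s : List Int) (t j n : Int) (h : fIdx s t j n < n) :
    t < elI s (fIdx s t j n) := by
  by_cases h1 : j < n
  · by_cases h2 : elI s j ≤ t
    · rw [fIdx, if_pos h1, if_pos h2] at h ⊢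
      exact fIdx_lt_imp s t (j + 1) n h
    · rw [fIdx, if_pos h1, if_neg h2] at h ⊢
      omega
  · rw [fIdx, if_neg h1] at h
    omega
termination_by (n - j).toNat
decreasing_by omega

theorem fIdx_ge (s : List Int) (t j n m : Int) (hj : j ≤ n) (hm : m ≤ n)
    (hall : ∀ k, j ≤ k → k < m → elI s k ≤ t) : m ≤ fIdx s t j n := by
  by_contra hc
  push Not at hc
  exact absurd (hall _ (fIdx_ge_self s t j n hj) hc)
    (not_le.mpr (fIdx_lt_imp s t j n (lt_of_lt_of_le hc hm)))

theorem fIdx_le (s : List Int) (t j n m : Int) (hm : j ≤ m) (ht : t < elI s m) :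
    fIdx s t j n ≤ m := by
  by_contra hc
  push Not at hc
  exact absurd (fIdx_mem_le s t j n m hm hc) (not_le.mpr ht)

theorem Gfun_ge_one (s : List Int) (n a : Int) : 1 ≤ Gfun s n a := by
  rw [Gfun]
  split_ifs with h
  · have := Gfun_ge_one s n (a + 1)
    omega
  · omega
termination_by (n - a).toNat
decreasing_by omega

theorem Gfun_ge_f (s : List Int) (n a : Int) (h : a < n) :
    fIdx s (elI s a + 5) a n - a ≤ Gfun s n a := by
  rw [Gfun, if_pos h]; exact le_max_left _ _

theorem Gfun_unfold (s : List Int) (n a : Int) (h : a < n) :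
    Gfun s n a = max (fIdx s (elI s a + 5) a n - a) (Gfun s n (a + 1)) := by
  rw [Gfun]; exact if_pos h

theorem Gfun_stop (s : List Int) (n a : Int) (h : n ≤ a) : Gfun s n a = 1 := by
  rw [Gfun]; exact if_neg (by omega)

-- binary-search correctness on a monotone list
theorem bsearchB_spec (s : List Int) (t : Int)
    (hmono : ∀ i j : Int, 0 ≤ i → i ≤ j → j < (s.length : Int) → elI s i ≤ elI s j) :
    ∀ lo hi : Int, 0 ≤ lo → lo ≤ hi → hi ≤ (s.length : Int) →
      ∃ m, bsearchB s t lo hi = some m ∧ lo ≤ m ∧ m ≤ hi ∧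
        (∀ k, lo ≤ k → k < m → elI s k ≤ t) ∧ (m < hi → t < elI s m) := by
  intro lo hi h0 hlh hhl
  by_cases h : lo < hi
  · rcases bmid_bounds lo hi h with ⟨hm1, hm2⟩
    have hget : PySem.List.pyGet? s (bmid lo hi) = some (elI s (bmid lo hi)) := by
      rw [PySem.List.pyGet?_eq_some_getElem s (by omega) (by omega)]
      unfold elI
      rw [List.getD_eq_getElem s 0 (by omega)]
    rw [bsearchB, if_pos h, hget]
    dsimp only
    by_cases hv : elI s (bmid lo hi) ≤ t
    · rw [if_pos hv]
      obtain ⟨m, heq, hml, hmh, hall, hgt⟩ :=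
        bsearchB_spec s t hmono (bmid lo hi + 1) hi (by omega) (by omega) hhl
      refine ⟨m, heq, by omega, hmh, ?_, hgt⟩
      intro k hk1 hk2
      by_cases hk : k ≤ bmid lo hi
      · exact le_trans (hmono k (bmid lo hi) (by omega) hk (by omega)) hv
      · exact hall k (by omega) hk2
    · rw [if_neg hv]
      obtain ⟨m, heq, hml, hmh, hall, hgt⟩ :=
        bsearchB_spec s t hmono lo (bmid lo hi) h0 (by omega) (by omega)
      refine ⟨m, heq, hml, by omega, hall, ?_⟩
      intro _
      rcases eq_or_lt_of_le hmh with rfl | hlt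
      · omega
      · exact hgt hlt
  · rw [bsearchB, if_neg h]
    exact ⟨lo, rfl, le_rfl, by omega, by omega, by omega⟩
termination_by lo hi => (hi - lo).toNat
decreasing_by
  all_goals (rcases bmid_bounds lo hi (by omega) with ⟨h1, h2⟩; omega)

-- A's while loop computes max ans (Gfun s n a) under the sliding-window invariant
theorem loopA_eq (s : List Int) (n : Int)
    (hmono : ∀ i j : Int, 0 ≤ i → i ≤ j → j < (s.length : Int) → elI s i ≤ elI s j)
    (hn : n ≤ (s.length : Int)) :
    ∀ a b ans cont : Int, 0 ≤ a → a ≤ b → b < n →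
      elI s b ≤ elI s a + 5 → b - a + 1 ≤ ans → cont = b - a + 1 →
      loopA n s a b ans cont = some (max ans (Gfun s n a)) := by
  intro a b ans cont ha hab hbn hw hans hcont
  rw [loopA, if_pos hbn]
  by_cases hb1 : b + 1 < n
  · have hg1 : PySem.List.pyGet? s (b + 1) = some (elI s (b + 1)) := by
      rw [PySem.List.pyGet?_eq_some_getElem s (by omega) (by omega)]
      unfold elI
      rw [List.getD_eq_getElem s 0 (by omega)]
    have hg2 : PySem.List.pyGet? s a = some (elI s a) := by
      rw [PySem.List.pyGet?_eq_some_getElem s (by omega) (by omega)]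
      unfold elI
      rw [List.getD_eq_getElem s 0 (by omega)]
    rw [if_pos hb1, hg1, hg2]
    dsimp only
    have hord : elI s a ≤ elI s (b + 1) := hmono a (b + 1) ha (by omega) (by omega)
    by_cases hc : elI s (b + 1) ≤ elI s a + 5
    · rw [if_pos (show |elI s (b + 1) - elI s a| ≤ 5 by rw [abs_of_nonneg (by omega)]; omega)]
      rw [loopA_eq s n hmono hn a (b + 1) (if ans < cont + 1 then cont + 1 else ans) (cont + 1)
          ha (by omega) hb1 hc (by split_ifs <;> omega) (by omega)]
      have hfge : b + 2 ≤ fIdx s (elI s a + 5) a n :=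
        fIdx_ge s (elI s a + 5) a n (b + 2) (by omega) (by omega)
          (fun k hk1 hk2 => le_trans (hmono k (b + 1) (by omega) (by omega) (by omega)) (by omega))
      have hGf := Gfun_ge_f s n a (by omega)
      congr 1
      split_ifs <;> omega
    · rw [if_neg (show ¬ |elI s (b + 1) - elI s a| ≤ 5 by rw [abs_of_nonneg (by omega)]; omega)]
      have hfle : fIdx s (elI s a + 5) a n ≤ b + 1 :=
        fIdx_le s (elI s a + 5) a n (b + 1) (by omega) (by omega)
      by_cases hcase : a + 1 > b
      · rw [if_pos hcase]
        by_cases hend : a + 1 < n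
        · rw [loopA_eq s n hmono hn (a + 1) (a + 1) ans (max 1 (cont - 1)) (by omega) le_rfl hend
              (by omega) (by omega) (by omega)]
          rw [Gfun_unfold s n a (by omega)]
          congr 1
          omega
        · rw [loopA, if_neg (by omega)]
          rw [Gfun_unfold s n a (by omega), Gfun_stop s n (a + 1) (by omega)]
          congr 1
          omega
      · rw [if_neg hcase]
        rw [loopA_eq s n hmono hn (a + 1) b ans (max 1 (cont - 1)) (by omega) (by omega) hbn
            (le_trans hw (by have := hmono a (a + 1) ha (by omega) (by omega); omega))
            (by omega) (by omega)]
        rw [Gfun_unfold s n a (by omega)]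
        congr 1
        omega
  · rw [if_neg hb1]
    have hfle : fIdx s (elI s a + 5) a n ≤ b + 1 := by
      have := fIdx_le_n s (elI s a + 5) a n (by omega)
      omega
    by_cases hcase : a + 1 > b
    · rw [if_pos hcase]
      by_cases hend : a + 1 < n
      · rw [loopA_eq s n hmono hn (a + 1) (a + 1) ans (max 1 (cont - 1)) (by omega) le_rfl hend
            (by omega) (by omega) (by omega)]
        rw [Gfun_unfold s n a (by omega)]
        congr 1
        omega
      · rw [loopA, if_neg (by omega)]
        rw [Gfun_unfold s n a (by omega), Gfun_stop s n (a + 1) (by omega)]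
        congr 1
        omega
    · rw [if_neg hcase]
      rw [loopA_eq s n hmono hn (a + 1) b ans (max 1 (cont - 1)) (by omega) (by omega) hbn
          (le_trans hw (by have := hmono a (a + 1) ha (by omega) (by omega); omega))
          (by omega) (by omega)]
      rw [Gfun_unfold s n a (by omega)]
      congr 1
      omega
termination_by a b ans cont => ((n - a).toNat + (n - b).toNat)
decreasing_by all_goals omega

-- B's for loop computes max ans (Gfun s n a)
theorem loopB_eq (s : List Int) (n : Int)
    (hmono : ∀ i j : Int, 0 ≤ i → i ≤ j → j < (s.length : Int) → elI s i ≤ elI s j)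
    (hn : n ≤ (s.length : Int)) :
    ∀ a ans : Int, 0 ≤ a → 1 ≤ ans →
      loopB s n ans (PySem.List.pyRange a (n - 1) 1) = some (max ans (Gfun s n a)) := by
  intro a ans ha hans
  by_cases h : a < n - 1
  · rw [PySem.List.pyRange_one_cons h]
    have hget : PySem.List.pyGet? s a = some (elI s a) := by
      rw [PySem.List.pyGet?_eq_some_getElem s (by omega) (by omega)]
      unfold elI
      rw [List.getD_eq_getElem s 0 (by omega)]
    rw [loopB, hget]
    dsimp only
    obtain ⟨m, hbs, hm1, hm2, hall, hgt⟩ :=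
      bsearchB_spec s (elI s a + 5) hmono a n ha (by omega) hn
    have hf : m = fIdx s (elI s a + 5) a n := by
      have hge : m ≤ fIdx s (elI s a + 5) a n :=
        fIdx_ge s (elI s a + 5) a n m (by omega) hm2 hall
      have hle : fIdx s (elI s a + 5) a n ≤ m := by
        rcases lt_or_ge m n with hlt | hge2
        · exact fIdx_le s (elI s a + 5) a n m hm1 (hgt hlt)
        · have := fIdx_le_n s (elI s a + 5) a n (by omega)
          omega
      omega
    rw [hbs]
    dsimp only
    rw [loopB_eq s n hmono hn (a + 1) (max ans (m - a)) (by omega) (by omega)]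
    rw [Gfun_unfold s n a (by omega), ← hf]
    congr 1
    omega
  · rw [PySem.List.pyRange_one_eq_nil (by omega), loopB]
    have hg : Gfun s n a = 1 := by
      rcases lt_or_ge a n with hlt | hge
    -- here a = n - 1
      · rw [Gfun_unfold s n a hlt]
        have hf1 : fIdx s (elI s a + 5) a n = a + 1 := by
          rw [fIdx, if_pos hlt, if_pos (by omega)]
          rw [fIdx, if_neg (by omega)]
          omega
        rw [hf1, Gfun_stop s n (a + 1) (by omega)]
        omega
      · exact Gfun_stop s n a hge
    rw [hg]
    congr 1
    omega
termination_by a ans => (n - 1 - a).toNat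
decreasing_by omega

-- ===== VERDICT (by name: the statement is the Claim_ definition above) =====
theorem getMaxNumMembers_spec : Claim_equal_getMaxNumMembers := by
  intro n team _ hpre
  unfold Spec_getMaxNumMembers getMaxNumMembers getMaxNumMembers_alt
  show (loopA n (PySem.List.sorted team (fun x => x) false) 0 0 1 1).getD 0 =
    (loopB (PySem.List.sorted team (fun x => x) false) n 1 (PySem.List.pyRange 0 (n - 1) 1)).getD 0
  set s := PySem.List.sorted team (fun x => x) false with hs
  have hlen : (s.length : Int) = (team.length : Int) := by
    rw [hs, PySem.List.length_sorted]
  have hmono : ∀ i j : Int, 0 ≤ i → i ≤ j → j < (s.length : Int) → elI s i ≤ elI s j := by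
    intro i j h0 hij hjl
    unfold elI
    rw [List.getD_eq_getElem s 0 (by omega), List.getD_eq_getElem s 0 (by omega)]
    have hl2 : j.toNat < s.length := by omega
    exact PySem.List.sorted_id_getElem_mono team (by omega) (hs ▸ hl2)
  rcases lt_or_ge n 1 with hlt | hge
  · rw [loopA, if_neg (by omega), PySem.List.pyRange_one_eq_nil (by omega), loopB]
  · rcases hpre with hp | hp
    · have hn1 : n = 1 := by omega
      subst hn1
      rw [PySem.List.pyRange_one_eq_nil (by omega), loopB]
      rw [loopA, if_pos (by omega : (0:Int) < 1), if_neg (by omega : ¬ ((0:Int) + 1 < 1))]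
      rw [if_pos (by omega : (0:Int) + 1 > 0)]
      rw [loopA, if_neg (by omega : ¬ ((0:Int) + 1 < 1))]
    · have hle : n ≤ (s.length : Int) := by omega
      rw [loopA_eq s n hmono hle 0 0 1 1 le_rfl le_rfl (by omega) (by omega) (by omega) (by omega)]
      rw [loopB_eq s n hmono hle 0 1 le_rfl le_rfl]
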